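-- pv_equiv track=rewrite | github.com/goood2280/flow | backend/app.py | _router_error_summary
-- ===== SOURCE A (Python) =====
-- def _router_error_summary(detail: str) -> str:
--     error_type = ""
--     error = ""
--     for line in str(detail or "").splitlines():
--         if line.startswith("error_type="):
--             error_type = line.split("=", 1)[1].strip()
--         elif line.startswith("error="):
--             error = line.split("=", 1)[1].strip()
--     if error_type and error:
--         return f"{error_type}: {error}"
--     if error:
--         return error
--     lines = [line.strip() for line in str(detail or "").splitlines() if line.strip()]
--     return lines[-1] if lines else "unknown router import error"
-- ===== SOURCE B (Python) =====
-- def _router_error_summary(detail: str) -> str: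
--     # B: instead of one forward pass accumulating both fields, search the
--     # lines BACK-TO-FRONT and stop at the first match (= last occurrence),
--     # once per key; the fallback likewise becomes a reverse search that
--     # returns the first non-blank stripped line from the end.
--     lines = str(detail or "").splitlines()
--
--     def last_value(key):
--         prefix = key + "="
--         for line in reversed(lines):
--             if line.startswith(prefix):
--                 return line.split("=", 1)[1].strip()
--         return ""
--
--     error_type = last_value("error_type")
--     error = last_value("error")
--     if error_type and error:
--         return f"{error_type}: {error}"
--     if error:
--         return error
--     for line in reversed(lines):
--         s = line.strip()
--         if s:
--             return s
--     return "unknown router import error"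
-- ===== Notes on version B (the rewrite author's own statement) =====
-- stated objective: alternative
-- what changed: Replaces A's single forward fold that accumulates both fields (and its filter-then-last fallback) with independent back-to-front searches with early exit: the first match from the end is the last occurrence, and the fallback returns the first non-blank stripped line found from the end.
import Mathlib
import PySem

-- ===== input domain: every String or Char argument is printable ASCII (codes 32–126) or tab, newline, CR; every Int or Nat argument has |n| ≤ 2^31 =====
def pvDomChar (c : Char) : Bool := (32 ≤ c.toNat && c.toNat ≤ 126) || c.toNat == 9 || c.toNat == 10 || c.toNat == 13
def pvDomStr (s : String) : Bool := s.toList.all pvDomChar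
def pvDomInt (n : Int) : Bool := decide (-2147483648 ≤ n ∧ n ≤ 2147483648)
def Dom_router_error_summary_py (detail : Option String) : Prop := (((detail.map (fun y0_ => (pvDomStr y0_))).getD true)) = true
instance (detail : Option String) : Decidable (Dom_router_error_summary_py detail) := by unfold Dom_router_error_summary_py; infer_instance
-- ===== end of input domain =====

-- B replaces A's forward fold over both fields (and its filter-then-last fallback) with
-- back-to-front searches with early exit (first match from the end = last occurrence);
-- objective: alternative traversal, same cost.

-- ===== PORT A =====
-- line.split("=", 1)[1].strip(); the [1] index is total here because both ports
-- only evaluate it on lines known to contain "=", where split yields two pieces.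
def pvVal (line : String) : String :=
  PySem.Str.strip ((PySem.List.pyGet? ((PySem.Str.splitMax? line "=" 1).getD []) 1).getD "")

-- the body of A's for-loop over (error_type, error)
def pvAStep (acc : String × String) (line : String) : String × String :=
  if PySem.Str.startswith line "error_type=" then (pvVal line, acc.2)
  else if PySem.Str.startswith line "error=" then (acc.1, pvVal line)
  else acc

def router_error_summary_py (detail : Option String) : String :=
  -- str(detail or "") = "" for None and for "", i.e. detail.getD ""
  let st := (PySem.Str.splitlines (detail.getD "")).foldl pvAStep ("", "")
  if st.1 != "" && st.2 != "" then st.1 ++ ": " ++ st.2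
  else if st.2 != "" then st.2
  else
    let lines := ((PySem.Str.splitlines (detail.getD "")).filter
        (fun line => PySem.Str.strip line != "")).map PySem.Str.strip
    if lines = [] then "unknown router import error" else (PySem.List.pyGet? lines (-1)).getD ""

-- ===== PORT B =====
-- B's last_value(key): scan the reversed lines, return at the first line starting with key ++ "="
def pvLastValue (lines : List String) (key : String) : String :=
  match lines.reverse.find? (fun line => PySem.Str.startswith line (key ++ "=")) with
  | some line => pvVal line
  | none => ""

def router_error_summary_py_alt (detail : Option String) : String :=
  let lines := PySem.Str.splitlines (detail.getD "")
  let error_type := pvLastValue lines "error_type"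
  let error := pvLastValue lines "error"
  if error_type != "" && error != "" then error_type ++ ": " ++ error
  else if error != "" then error
  else
    -- for line in reversed(lines): s = line.strip(); if s: return s
    match lines.reverse.find? (fun line => PySem.Str.strip line != "") with
    | some line => PySem.Str.strip line
    | none => "unknown router import error"

-- ===== PRECONDITION & SPEC =====
def Spec_router_error_summary_py (detail : Option String) (out : String) : Prop := out = router_error_summary_py_alt detail
instance (detail : Option String) (out : String) : Decidable (Spec_router_error_summary_py detail out) := by unfold Spec_router_error_summary_py; infer_instance

-- ===== CLAIM (what is proved, stated in full; the proofs are below) =====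
def Claim_equal_router_error_summary_py : Prop := ∀ (detail : Option String), Dom_router_error_summary_py detail → Spec_router_error_summary_py detail (router_error_summary_py detail)

-- ===== LEMMAS AND PROOFS =====

-- A's loop for ONE key, as a fold: keep the last 'pk'-prefixed line's value
def pvScalarStep (pk : String) (acc line : String) : String :=
  if PySem.Str.startswith line pk then pvVal line else acc

-- no line starts with both "error_type=" and "error="
theorem pv_not_both (line : String) (h1 : PySem.Str.startswith line "error_type=" = true)
    (h2 : PySem.Str.startswith line "error=" = true) : False := by
  rw [PySem.Str.startswith_eq, PySem.Chars.startswith_iff] at h1 h2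
  rcases List.prefix_or_prefix_of_prefix h1 h2 with h | h
  · exact absurd h (by decide)
  · exact absurd h (by decide)

-- A's pair loop is the product of the two single-key loops
theorem pv_fold_a (lines : List String) : ∀ (t e : String),
    lines.foldl pvAStep (t, e) =
      (lines.foldl (pvScalarStep "error_type=") t, lines.foldl (pvScalarStep "error=") e) := by
  induction lines with
  | nil => intro t e; rfl
  | cons line rest ih =>
    intro t e
    simp only [List.foldl_cons]
    rw [← ih]
    congr 1
    unfold pvAStep pvScalarStep
    by_cases h1 : PySem.Str.startswith line "error_type=" = true
    · rw [if_pos h1, if_pos h1, if_neg (fun h2 => pv_not_both line h1 h2)]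
    · rw [if_neg h1, if_neg h1]
      by_cases h2 : PySem.Str.startswith line "error=" = true
      · rw [if_pos h2, if_pos h2]
      · rw [if_neg h2, if_neg h2]

-- A's single-key fold = B's first-match-from-the-end search
theorem pv_fold_scalar (pk : String) (lines : List String) : ∀ (acc : String),
    lines.foldl (pvScalarStep pk) acc =
      match lines.reverse.find? (fun l => PySem.Str.startswith l pk) with
      | some l => pvVal l
      | none => acc := by
  induction lines with
  | nil => intro acc; rfl
  | cons line rest ih =>
    intro acc
    simp only [List.foldl_cons, List.reverse_cons, List.find?_append]
    rw [ih]
    cases hf : rest.reverse.find? (fun l => PySem.Str.startswith l pk) with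
    | some l => simp
    | none =>
      simp only [List.find?_singleton]
      unfold pvScalarStep
      cases hp : PySem.Chars.startswith line.toList pk.toList with
      | false => simp [PySem.Str.startswith, hp]
      | true => simp [PySem.Str.startswith, hp]

-- find? is the head of the filtered list
theorem pv_find_eq_head_filter {α : Type} (p : α → Bool) (l : List α) :
    l.find? p = (l.filter p).head? := by
  induction l with
  | nil => rfl
  | cons x xs ih =>
    cases h : p x with
    | true => simp only [List.find?_cons, List.filter_cons, h, if_true]; rfl
    | false => simp only [List.find?_cons, List.filter_cons, h]; exact ih

-- A's fallback (strip, filter, last) = B's reverse search for a non-blank line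
theorem pv_fallback (lines : List String) :
    (let L := (lines.filter (fun line => PySem.Str.strip line != "")).map PySem.Str.strip
     if L = [] then "unknown router import error" else (PySem.List.pyGet? L (-1)).getD "") =
      match lines.reverse.find? (fun line => PySem.Str.strip line != "") with
      | some line => PySem.Str.strip line
      | none => "unknown router import error" := by
  rw [pv_find_eq_head_filter, List.filter_reverse, ← List.getLast?_eq_head?_reverse]
  dsimp only
  by_cases hne : List.filter (fun line => PySem.Str.strip line != "") lines = []
  · simp [hne]
  · rw [if_neg (by simpa using hne), PySem.List.pyGet?_neg_one, List.getLast?_map]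
    cases hE : (List.filter (fun line => PySem.Str.strip line != "") lines).getLast? with
    | none => exact absurd (List.getLast?_eq_none_iff.mp hE) hne
    | some v => simp

-- ===== VERDICT (by name: the statement is the Claim_ definition above) =====
theorem router_error_summary_py_spec : Claim_equal_router_error_summary_py := by
  intro detail _
  unfold Spec_router_error_summary_py router_error_summary_py router_error_summary_py_alt
  dsimp only
  rw [pv_fold_a, pv_fold_scalar, pv_fold_scalar, pv_fallback]
  simp only [pvLastValue]
  rfl
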